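-- pv_equiv track=rewrite | github.com/mazim-lab/churningcanada | scrapers/parsers/canadian_banks.py | parse_rbc_business
-- ===== SOURCE A (Python) =====
-- def parse_rbc_business(text: str) -> list[dict]:
--     """Parse RBC business cards (descriptive layout)."""
--     cards = []
--     lines = [l.strip() for l in text.split("\n") if l.strip()]
--     # Find card names followed by card details
--     card_lines = []
--     for i, line in enumerate(lines):
--         if ("Visa" in line or "Mastercard" in line) and len(line) < 80 and len(line) > 10:
--             # Check if this looks like a card name (not a reference line)
--             if i > 0 and ("Call" in lines[i - 1] or "Explore" in lines[i - 1] or i < 3):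
--                 continue
--             card_lines.append((i, line))
--
--     # Dedupe and pick actual card names
--     seen = set()
--     for idx, name in card_lines:
--         if name in seen:
--             continue
--         seen.add(name)
--         card = {"name": name, "type": "business"}
--         # Look for annual fee in next 20 lines
--         for j in range(idx, min(idx + 20, len(lines))):
--             if "Annual Fee:" in lines[j]:
--                 card["annual_fee"] = lines[j].split(":")[-1].strip()
--                 break
--             if lines[j] == "Annual Fee:" and j + 1 < len(lines):
--                 card["annual_fee"] = lines[j + 1]
--                 break
--         for j in range(idx, min(idx + 20, len(lines))):
--             if "Purchase Rate:" in lines[j] and j + 1 < len(lines):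
--                 card["interest_purchases"] = lines[j + 1]
--                 break
--         for j in range(idx, min(idx + 10, len(lines))):
--             if any(k in lines[j].lower() for k in ["welcome", "bonus", "receive"]) and len(lines[j]) > 15:
--                 card["welcome_bonus"] = lines[j]
--                 break
--         cards.append(card)
--     return cards
-- ===== SOURCE B (Python) =====
-- def parse_rbc_business(text: str) -> list[dict]:
--     """Parse RBC business cards (descriptive layout).
--
--     Single-pass variant: card detection and dedupe are fused into one scan,
--     and the three per-card forward scans are merged into one window loop
--     that maintains one first-match slot per field.
--     """
--     lines = [l.strip() for l in text.split("\n") if l.strip()]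
--     n = len(lines)
--     cards = []
--     seen = set()
--     for i, line in enumerate(lines):
--         if not (("Visa" in line or "Mastercard" in line) and 10 < len(line) < 80):
--             continue
--         if i > 0 and ("Call" in lines[i - 1] or "Explore" in lines[i - 1] or i < 3):
--             continue
--         if line in seen:
--             continue
--         seen.add(line)
--         fee = rate = welcome = None
--         for j in range(i, min(i + 20, n)):
--             lj = lines[j]
--             if fee is None and "Annual Fee:" in lj:
--                 fee = lj.split(":")[-1].strip()
--             if rate is None and "Purchase Rate:" in lj and j + 1 < n:
--                 rate = lines[j + 1]
--             if (welcome is None and j < i + 10 and len(lj) > 15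
--                     and any(k in lj.lower() for k in ("welcome", "bonus", "receive"))):
--                 welcome = lj
--             if fee is not None and rate is not None and (welcome is not None or j >= i + 10):
--                 break
--         card = {"name": line, "type": "business"}
--         if fee is not None:
--             card["annual_fee"] = fee
--         if rate is not None:
--             card["interest_purchases"] = rate
--         if welcome is not None:
--             card["welcome_bonus"] = welcome
--         cards.append(card)
--     return cards
-- ===== Notes on version B (the rewrite author's own statement) =====
-- stated objective: alternative
-- what changed: Detection and dedupe are fused into one scan with the seen-set maintained inline (A builds a full candidate list first), and the three separate forward window scans per card are merged into a single loop over the 20-line window keeping one first-match slot per field (the welcome field restricted by a j < i+10 guard), breaking once no field can still change; A's dead exact-match annual-fee branch is dropped.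
import Mathlib
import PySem

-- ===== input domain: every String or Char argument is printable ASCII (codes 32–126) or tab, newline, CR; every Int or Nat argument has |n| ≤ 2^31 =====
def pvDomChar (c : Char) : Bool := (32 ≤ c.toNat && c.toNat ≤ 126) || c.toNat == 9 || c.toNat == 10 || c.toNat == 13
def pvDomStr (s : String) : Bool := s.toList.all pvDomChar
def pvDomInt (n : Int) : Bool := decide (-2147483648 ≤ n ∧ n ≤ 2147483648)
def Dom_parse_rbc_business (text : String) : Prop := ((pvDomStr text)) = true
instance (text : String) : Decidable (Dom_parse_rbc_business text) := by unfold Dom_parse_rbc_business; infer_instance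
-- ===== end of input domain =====

-- B fuses detection+dedupe into one scan and merges the three per-card window scans into one
-- loop with a first-match slot per field (objective: alternative decomposition, same cost).

-- ===== PORT A =====
-- shared line normalisation: [l.strip() for l in text.split("\n") if l.strip()]
def rbcStripNE (text : String) : List (List Char) :=
  ((PySem.Chars.splitOn text.toList "\n".toList).map PySem.Chars.strip).filter (fun l => decide (l ≠ []))

-- shared card-name test (detection condition incl. the reference-line skip)
def rbcIsCard (lines : List (List Char)) (p : Int × List Char) : Bool :=
  ((PySem.Chars.isIn "Visa".toList p.2 || PySem.Chars.isIn "Mastercard".toList p.2) &&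
      decide (p.2.length < 80) && decide (p.2.length > 10)) &&
  !(decide (p.1 > 0) &&
      (PySem.Chars.isIn "Call".toList (PySem.List.pyGetD lines (p.1 - 1) []) ||
       PySem.Chars.isIn "Explore".toList (PySem.List.pyGetD lines (p.1 - 1) []) ||
       decide (p.1 < 3)))

-- lines[j].split(":")[-1].strip()
def feeVal (lj : List Char) : List Char :=
  PySem.Chars.strip (PySem.List.pyGetD (PySem.Chars.splitOn lj ":".toList) (-1) [])

-- any(k in lj.lower() for k in ["welcome", "bonus", "receive"])
def anyKw (lj : List Char) : Bool :=
  PySem.Chars.isIn "welcome".toList (PySem.Chars.lower lj) ||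
  PySem.Chars.isIn "bonus".toList (PySem.Chars.lower lj) ||
  PySem.Chars.isIn "receive".toList (PySem.Chars.lower lj)

-- A's first field loop (with its dead exact-match elif kept)
def feeLoopA (lines : List (List Char)) (n : Int) : List Int → Option (List Char)
  | [] => none
  | j :: rest =>
    let lj := PySem.List.pyGetD lines j []
    if PySem.Chars.isIn "Annual Fee:".toList lj then some (feeVal lj)
    else if lj = "Annual Fee:".toList ∧ j + 1 < n then some (PySem.List.pyGetD lines (j + 1) [])
    else feeLoopA lines n rest

def rateLoopA (lines : List (List Char)) (n : Int) : List Int → Option (List Char)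
  | [] => none
  | j :: rest =>
    if PySem.Chars.isIn "Purchase Rate:".toList (PySem.List.pyGetD lines j []) ∧ j + 1 < n
    then some (PySem.List.pyGetD lines (j + 1) [])
    else rateLoopA lines n rest

def welLoopA (lines : List (List Char)) : List Int → Option (List Char)
  | [] => none
  | j :: rest =>
    let lj := PySem.List.pyGetD lines j []
    if anyKw lj ∧ lj.length > 15 then some lj else welLoopA lines rest

def cardA (lines : List (List Char)) (idx : Int) (name : List Char) : List (String × String) :=
  let n : Int := lines.length
  let card := [("name", String.ofList name), ("type", "business")]
  let card := match feeLoopA lines n (PySem.List.pyRange idx (min (idx + 20) n) 1) with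
    | some v => card ++ [("annual_fee", String.ofList v)]
    | none => card
  let card := match rateLoopA lines n (PySem.List.pyRange idx (min (idx + 20) n) 1) with
    | some v => card ++ [("interest_purchases", String.ofList v)]
    | none => card
  match welLoopA lines (PySem.List.pyRange idx (min (idx + 10) n) 1) with
  | some v => card ++ [("welcome_bonus", String.ofList v)]
  | none => card

def stepA (lines : List (List Char))
    (st : PySem.Set (List Char) × List (List (String × String))) (p : Int × List Char) :
    PySem.Set (List Char) × List (List (String × String)) :=
  if PySem.Set.contains st.1 p.2 then st
  else (PySem.Set.add st.1 p.2, st.2 ++ [cardA lines p.1 p.2])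

def parse_rbc_business (text : String) : List (List (String × String)) :=
  let lines := rbcStripNE text
  let card_lines := (PySem.List.enumerate lines 0).foldl
    (fun acc p => if rbcIsCard lines p then acc ++ [p] else acc) ([] : List (Int × List Char))
  (card_lines.foldl (stepA lines) ((PySem.Set.empty : PySem.Set (List Char)), [])).2

-- ===== PORT B =====
def upFee (lj : List Char) (fee : Option (List Char)) : Option (List Char) :=
  if fee.isNone && PySem.Chars.isIn "Annual Fee:".toList lj then some (feeVal lj) else fee

def upRate (lines : List (List Char)) (n j : Int) (lj : List Char) (rate : Option (List Char)) :
    Option (List Char) :=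
  if rate.isNone && PySem.Chars.isIn "Purchase Rate:".toList lj && decide (j + 1 < n)
  then some (PySem.List.pyGetD lines (j + 1) []) else rate

def upWel (idx j : Int) (lj : List Char) (wel : Option (List Char)) : Option (List Char) :=
  if wel.isNone && decide (j < idx + 10) && decide (lj.length > 15) && anyKw lj
  then some lj else wel

-- one window scan maintaining a first-match slot per field, with early break
def fieldsB (lines : List (List Char)) (n idx : Int) :
    List Int → Option (List Char) → Option (List Char) → Option (List Char) →
    Option (List Char) × Option (List Char) × Option (List Char)
  | [], fee, rate, wel => (fee, rate, wel)
  | j :: rest, fee, rate, wel =>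
    let lj := PySem.List.pyGetD lines j []
    let fee := upFee lj fee
    let rate := upRate lines n j lj rate
    let wel := upWel idx j lj wel
    if fee.isSome && rate.isSome && (wel.isSome || decide (idx + 10 ≤ j)) then (fee, rate, wel)
    else fieldsB lines n idx rest fee rate wel

def cardB (lines : List (List Char)) (idx : Int) (name : List Char) : List (String × String) :=
  let n : Int := lines.length
  let frw := fieldsB lines n idx (PySem.List.pyRange idx (min (idx + 20) n) 1) none none none
  let card := [("name", String.ofList name), ("type", "business")]
  let card := match frw.1 with
    | some v => card ++ [("annual_fee", String.ofList v)]
    | none => card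
  let card := match frw.2.1 with
    | some v => card ++ [("interest_purchases", String.ofList v)]
    | none => card
  match frw.2.2 with
  | some v => card ++ [("welcome_bonus", String.ofList v)]
  | none => card

def stepB (lines : List (List Char))
    (st : PySem.Set (List Char) × List (List (String × String))) (p : Int × List Char) :
    PySem.Set (List Char) × List (List (String × String)) :=
  if PySem.Set.contains st.1 p.2 then st
  else (PySem.Set.add st.1 p.2, st.2 ++ [cardB lines p.1 p.2])

def parse_rbc_business_alt (text : String) : List (List (String × String)) :=
  let lines := rbcStripNE text
  ((PySem.List.enumerate lines 0).foldl
    (fun st p => if rbcIsCard lines p then stepB lines st p else st)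
    ((PySem.Set.empty : PySem.Set (List Char)), [])).2

-- ===== PRECONDITION & SPEC =====
def Spec_parse_rbc_business (text : String) (out : List (List (String × String))) : Prop := out = parse_rbc_business_alt text
instance (text : String) (out : List (List (String × String))) : Decidable (Spec_parse_rbc_business text out) := by unfold Spec_parse_rbc_business; infer_instance

-- ===== CLAIM (what is proved, stated in full; the proofs are below) =====
def Claim_equal_parse_rbc_business : Prop := ∀ (text : String), Dom_parse_rbc_business text → Spec_parse_rbc_business text (parse_rbc_business text)

-- ===== LEMMAS AND PROOFS =====

-- first-match combinator: the value a field slot ends with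
def oOr {α : Type} : Option α → Option α → Option α
  | some v, _ => some v
  | none, b => b

@[simp] lemma oOr_some {α : Type} (v : α) (b : Option α) : oOr (some v) b = some v := rfl
@[simp] lemma oOr_none {α : Type} (b : Option α) : oOr none b = b := rfl
@[simp] lemma oOr_right_none {α : Type} (a : Option α) : oOr a none = a := by cases a <;> rfl

-- fieldsB without the early break
def fieldsNB (lines : List (List Char)) (n idx : Int) :
    List Int → Option (List Char) → Option (List Char) → Option (List Char) →
    Option (List Char) × Option (List Char) × Option (List Char)
  | [], fee, rate, wel => (fee, rate, wel)
  | j :: rest, fee, rate, wel =>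
    let lj := PySem.List.pyGetD lines j []
    fieldsNB lines n idx rest (upFee lj fee) (upRate lines n j lj rate) (upWel idx j lj wel)

lemma fieldsNB_allsome (lines : List (List Char)) (n idx : Int) :
    ∀ (js : List Int) (a b c : List Char),
      fieldsNB lines n idx js (some a) (some b) (some c) = (some a, some b, some c)
  | [], _, _, _ => rfl
  | _ :: rest, a, b, c => by
    simp only [fieldsNB, upFee, upRate, upWel, Option.isNone_some, Bool.false_and]
    exact fieldsNB_allsome lines n idx rest a b c

lemma fieldsNB_far (lines : List (List Char)) (n idx : Int) :
    ∀ (js : List Int) (a b : List Char), (∀ k ∈ js, idx + 10 ≤ k) →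
      fieldsNB lines n idx js (some a) (some b) none = (some a, some b, none)
  | [], _, _, _ => rfl
  | j :: rest, a, b, h => by
    have hj : ¬ (j < idx + 10) := by have := h j (by simp); omega
    simp only [fieldsNB]
    rw [show upFee (PySem.List.pyGetD lines j []) (some a) = some a from by simp [upFee],
      show upRate lines n j (PySem.List.pyGetD lines j []) (some b) = some b from by simp [upRate],
      show upWel idx j (PySem.List.pyGetD lines j []) none = none from by simp [upWel, hj]]
    exact fieldsNB_far lines n idx rest a b (fun k hk => h k (by simp [hk]))

lemma fieldsB_eq_fieldsNB (lines : List (List Char)) (n idx : Int) :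
    ∀ (js : List Int), js.Pairwise (· < ·) →
      ∀ fee rate wel, fieldsB lines n idx js fee rate wel = fieldsNB lines n idx js fee rate wel := by
  intro js
  induction js with
  | nil => intro _ fee rate wel; rfl
  | cons j rest ih =>
    intro hp fee rate wel
    rw [List.pairwise_cons] at hp
    simp only [fieldsB, fieldsNB]
    by_cases hbr : ((upFee (PySem.List.pyGetD lines j []) fee).isSome &&
        (upRate lines n j (PySem.List.pyGetD lines j []) rate).isSome &&
        ((upWel idx j (PySem.List.pyGetD lines j []) wel).isSome || decide (idx + 10 ≤ j))) = true
    · rw [if_pos hbr]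
      rw [Bool.and_eq_true, Bool.and_eq_true, Bool.or_eq_true] at hbr
      obtain ⟨⟨hf, hrt⟩, hw⟩ := hbr
      obtain ⟨a, ha⟩ := Option.isSome_iff_exists.mp hf
      obtain ⟨b, hb⟩ := Option.isSome_iff_exists.mp hrt
      rcases hw with hw | hw
      · obtain ⟨c, hc⟩ := Option.isSome_iff_exists.mp hw
        rw [ha, hb, hc, fieldsNB_allsome]
      · have hj : idx + 10 ≤ j := of_decide_eq_true hw
        clear hw hf hrt
        cases hwv : upWel idx j (PySem.List.pyGetD lines j []) wel with
        | some c => rw [ha, hb]; exact (fieldsNB_allsome lines n idx rest a b c).symm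
        | none =>
          rw [ha, hb]
          exact (fieldsNB_far lines n idx rest a b
            (fun k hk => by have := hp.1 k hk; omega)).symm
    · rw [if_neg hbr]
      exact ih hp.2 _ _ _

-- a line equal to "Annual Fee:" contains it, so A's elif is dead code
lemma ne_of_not_isIn (s lj : List Char) (h : PySem.Chars.isIn s lj = false) : lj ≠ s := by
  intro he
  rw [he, PySem.Chars.isIn_eq_false_iff] at h
  exact h (List.infix_refl s)

lemma fieldsNB_fst (lines : List (List Char)) (n idx : Int) :
    ∀ (js : List Int) (fee rate wel : Option (List Char)),
      (fieldsNB lines n idx js fee rate wel).1 = oOr fee (feeLoopA lines n js)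
  | [], fee, rate, wel => by cases fee <;> rfl
  | j :: rest, fee, rate, wel => by
    simp only [fieldsNB, feeLoopA]
    cases fee with
    | some v =>
      rw [show upFee (PySem.List.pyGetD lines j []) (some v) = some v from by
        simp [upFee]]
      rw [fieldsNB_fst lines n idx rest]; rfl
    | none =>
      cases hin : PySem.Chars.isIn "Annual Fee:".toList (PySem.List.pyGetD lines j []) with
      | true =>
        rw [show upFee (PySem.List.pyGetD lines j []) none =
            some (feeVal (PySem.List.pyGetD lines j [])) from by
          simp only [upFee, Option.isNone_none, Bool.true_and]; rw [hin]; rfl]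
        rw [fieldsNB_fst lines n idx rest]
        simp
      | false =>
        rw [show upFee (PySem.List.pyGetD lines j []) none = none from by
          simp only [upFee, Option.isNone_none, Bool.true_and]; rw [hin]; rfl]
        rw [fieldsNB_fst lines n idx rest,
          if_neg (by simp), if_neg (fun h => ne_of_not_isIn _ _ hin h.1)]

lemma fieldsNB_rate (lines : List (List Char)) (n idx : Int) :
    ∀ (js : List Int) (fee rate wel : Option (List Char)),
      (fieldsNB lines n idx js fee rate wel).2.1 = oOr rate (rateLoopA lines n js)
  | [], fee, rate, wel => by cases rate <;> rfl
  | j :: rest, fee, rate, wel => by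
    simp only [fieldsNB, rateLoopA]
    cases rate with
    | some v =>
      rw [show upRate lines n j (PySem.List.pyGetD lines j []) (some v) = some v from by
        simp [upRate]]
      rw [fieldsNB_rate lines n idx rest]; rfl
    | none =>
      by_cases hc : PySem.Chars.isIn "Purchase Rate:".toList (PySem.List.pyGetD lines j []) = true
          ∧ j + 1 < n
      · rw [show upRate lines n j (PySem.List.pyGetD lines j []) none =
            some (PySem.List.pyGetD lines (j + 1) []) from by
          simp only [upRate, Option.isNone_none, Bool.true_and]
          rw [hc.1, decide_eq_true hc.2]; rfl]
        rw [fieldsNB_rate lines n idx rest, if_pos hc]; rfl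
      · rw [show upRate lines n j (PySem.List.pyGetD lines j []) none = none from by
          simp only [upRate, Option.isNone_none, Bool.true_and]
          rw [if_neg]; intro h
          rw [Bool.and_eq_true, decide_eq_true_eq] at h
          exact hc ⟨h.1, h.2⟩]
        rw [fieldsNB_rate lines n idx rest, if_neg hc]

lemma fieldsNB_wel (lines : List (List Char)) (n idx : Int) :
    ∀ (js : List Int) (fee rate wel : Option (List Char)),
      (fieldsNB lines n idx js fee rate wel).2.2 =
        oOr wel (welLoopA lines (js.filter (fun j => decide (j < idx + 10))))
  | [], fee, rate, wel => by cases wel <;> rfl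
  | j :: rest, fee, rate, wel => by
    simp only [fieldsNB]
    cases wel with
    | some v =>
      rw [show upWel idx j (PySem.List.pyGetD lines j []) (some v) = some v from by
        simp [upWel]]
      rw [fieldsNB_wel lines n idx rest]; rfl
    | none =>
      by_cases hw : j < idx + 10
      · rw [show (j :: rest).filter (fun j => decide (j < idx + 10)) =
            j :: rest.filter (fun j => decide (j < idx + 10)) from by
          simp [hw]]
        simp only [welLoopA]
        by_cases hm : anyKw (PySem.List.pyGetD lines j []) = true ∧
            (PySem.List.pyGetD lines j []).length > 15
        · rw [show upWel idx j (PySem.List.pyGetD lines j []) none =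
              some (PySem.List.pyGetD lines j []) from by
            simp [upWel, hw, hm.1]; omega]
          rw [fieldsNB_wel lines n idx rest, if_pos hm]; rfl
        · rw [show upWel idx j (PySem.List.pyGetD lines j []) none = none from by
            simp only [upWel, Option.isNone_none, Bool.true_and]
            rw [if_neg]; intro h
            simp only [Bool.and_eq_true, decide_eq_true_eq] at h
            exact hm ⟨h.2, by omega⟩]
          rw [fieldsNB_wel lines n idx rest, if_neg hm]
      · rw [show (j :: rest).filter (fun j => decide (j < idx + 10)) =
            rest.filter (fun j => decide (j < idx + 10)) from by
          simp [hw]]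
        rw [show upWel idx j (PySem.List.pyGetD lines j []) none = none from by
          simp [upWel, hw]]
        rw [fieldsNB_wel lines n idx rest]

-- the j < idx+10 guard over the 20-window is exactly A's 10-window
lemma filter_range20 (idx n : Int) :
    (PySem.List.pyRange idx (min (idx + 20) n) 1).filter (fun j => decide (j < idx + 10)) =
      PySem.List.pyRange idx (min (idx + 10) n) 1 := by
  by_cases h : idx ≤ min (idx + 10) n
  · rw [PySem.List.pyRange_one_append idx (min (idx + 10) n) (min (idx + 20) n) h (by omega),
      List.filter_append]
    have h1 : (PySem.List.pyRange idx (min (idx + 10) n) 1).filter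
        (fun j => decide (j < idx + 10)) = PySem.List.pyRange idx (min (idx + 10) n) 1 := by
      apply List.filter_eq_self.mpr
      intro a ha
      rw [PySem.List.mem_pyRange_one] at ha
      simp; omega
    have h2 : (PySem.List.pyRange (min (idx + 10) n) (min (idx + 20) n) 1).filter
        (fun j => decide (j < idx + 10)) = [] := by
      apply List.filter_eq_nil_iff.mpr
      intro a ha
      rw [PySem.List.mem_pyRange_one] at ha
      simp; omega
    rw [h1, h2, List.append_nil]
  · have h20 : PySem.List.pyRange idx (min (idx + 20) n) 1 = [] :=
      List.eq_nil_of_length_eq_zero (by rw [PySem.List.length_pyRange_one]; omega)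
    have h10 : PySem.List.pyRange idx (min (idx + 10) n) 1 = [] :=
      List.eq_nil_of_length_eq_zero (by rw [PySem.List.length_pyRange_one]; omega)
    rw [h20, h10]; rfl

lemma cardA_eq_cardB (lines : List (List Char)) (idx : Int) (name : List Char) :
    cardA lines idx name = cardB lines idx name := by
  simp only [cardA, cardB]
  rw [fieldsB_eq_fieldsNB lines _ idx _ (PySem.List.pairwise_lt_pyRange_one _ _),
    fieldsNB_fst, fieldsNB_rate, fieldsNB_wel, filter_range20]
  simp only [oOr_none]

lemma stepA_eq_stepB (lines : List (List Char)) : stepA lines = stepB lines := by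
  funext st p
  unfold stepA stepB
  rw [cardA_eq_cardB]

-- ===== VERDICT (by name: the statement is the Claim_ definition above) =====
theorem parse_rbc_business_spec : Claim_equal_parse_rbc_business := by
  intro text _
  simp only [Spec_parse_rbc_business, parse_rbc_business, parse_rbc_business_alt]
  rw [PySem.List.foldl_append_if_eq_filter, List.nil_append,
    PySem.List.foldl_if_eq_foldl_filter, stepA_eq_stepB]
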